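-- pv_equiv track=rewrite | github.com/aorith/aoc2021 | 19/19.py | transform
-- ===== SOURCE A (Python) =====
-- from itertools import permutations
--
-- def transform(point, ax, offset=(0, 0, 0)):
--     assert len(point) == 3
--     assert 0 <= ax < 48
--     assert len(offset) == 3
--
--     coord = list(point)
--     for i, p in enumerate(permutations((0, 1, 2))):
--         if i == ax // 8:
--             coord = [coord[p[0]], coord[p[1]], coord[p[2]]]
--             break
--
--     signs = (
--         1 if ax % 2 == 1 else -1,
--         1 if ax // 2 % 2 == 1 else -1,
--         1 if ax // 4 % 2 == 1 else -1,
--     )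
--     for i in range(3):
--         coord[i] *= signs[i]
--         coord[i] += offset[i]
--
--     return tuple(coord)
-- ===== SOURCE B (Python) =====
-- from itertools import permutations
--
-- def transform(point, ax, offset=(0, 0, 0)):
--     perm = list(permutations((0, 1, 2)))[ax // 8]
--     signs = (1 if ax & 1 else -1,
--              1 if (ax >> 1) & 1 else -1,
--              1 if (ax >> 2) & 1 else -1)
--     M = [[0, 0, 0] for _ in range(3)]
--     for i in range(3):
--         M[i][perm[i]] = signs[i]
--     return tuple(sum(M[i][j] * point[j] for j in range(3)) + offset[i]
--                  for i in range(3))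
-- ===== Notes on version B (the rewrite author's own statement) =====
-- stated objective: alternative
-- what changed: B builds an explicit 3x3 signed permutation matrix from ax and computes a matrix-vector product plus offset, instead of A's enumerate-permutations loop that permutes the list in place and then scales each coordinate.
import Mathlib
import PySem

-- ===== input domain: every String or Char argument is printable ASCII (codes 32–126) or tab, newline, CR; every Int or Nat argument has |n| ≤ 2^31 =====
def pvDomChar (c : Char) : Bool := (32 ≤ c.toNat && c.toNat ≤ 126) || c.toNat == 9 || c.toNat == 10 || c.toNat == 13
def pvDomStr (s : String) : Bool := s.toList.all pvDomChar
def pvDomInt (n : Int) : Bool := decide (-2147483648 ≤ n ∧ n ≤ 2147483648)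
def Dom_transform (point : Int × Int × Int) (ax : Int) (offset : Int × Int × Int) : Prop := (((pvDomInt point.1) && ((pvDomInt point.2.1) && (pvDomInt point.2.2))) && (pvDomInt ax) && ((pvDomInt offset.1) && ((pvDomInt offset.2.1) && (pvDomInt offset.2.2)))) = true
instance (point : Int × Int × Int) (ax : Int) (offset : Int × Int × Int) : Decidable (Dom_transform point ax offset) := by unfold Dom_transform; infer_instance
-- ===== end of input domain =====

-- B replaces A's enumerate-and-break permutation loop by an explicit 3x3 signed
-- permutation matrix applied as a matrix-vector product (alternative structure, same cost).

-- ===== PORT A =====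
-- the 6 permutations of (0,1,2) in itertools order
def pvPermsA : List (Nat × Nat × Nat) := [(0,1,2),(0,2,1),(1,0,2),(1,2,0),(2,0,1),(2,1,0)]

-- coord[k] for the 3-tuple coord and a literal index k ∈ {0,1,2} (exact: A only indexes with 0,1,2)
def pvIdx3 (c : Int × Int × Int) (k : Nat) : Int :=
  if k = 0 then c.1 else if k = 1 then c.2.1 else c.2.2

-- 'for i, p in enumerate(permutations(...)): if i == ax // 8: coord = ...; break'
def pvPermLoop (ax : Int) (c : Int × Int × Int) : List (Int × (Nat × Nat × Nat)) → Int × Int × Int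
  | [] => c
  | (i, p) :: rest =>
    if i = PySem.Int.floordiv ax 8 then
      (pvIdx3 c p.1, pvIdx3 c p.2.1, pvIdx3 c p.2.2)
    else pvPermLoop ax c rest

def transform (point : Int × Int × Int) (ax : Int) (offset : Int × Int × Int) : Int × Int × Int :=
  let coord := pvPermLoop ax point (PySem.List.enumerate pvPermsA)
  let s0 : Int := if PySem.Int.mod ax 2 = 1 then 1 else -1
  let s1 : Int := if PySem.Int.mod (PySem.Int.floordiv ax 2) 2 = 1 then 1 else -1
  let s2 : Int := if PySem.Int.mod (PySem.Int.floordiv ax 4) 2 = 1 then 1 else -1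
  (coord.1 * s0 + offset.1, coord.2.1 * s1 + offset.2.1, coord.2.2 * s2 + offset.2.2)

-- ===== PORT B =====
def pvPermsB : List (List Nat) := [[0,1,2],[0,2,1],[1,0,2],[1,2,0],[2,0,1],[2,1,0]]

def transform_alt (point : Int × Int × Int) (ax : Int) (offset : Int × Int × Int) : Int × Int × Int :=
  -- list(permutations((0,1,2)))[ax // 8]; out of range = IndexError, excluded by Pre_
  let perm : List Nat := (PySem.List.pyGet? pvPermsB (PySem.Int.floordiv ax 8)).getD []
  -- ax & 1 = mod ax 2, (ax >> k) & 1 = mod (floordiv ax 2^k) 2 (exact for all ints in floored semantics)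
  let signs : List Int :=
    [if PySem.Int.mod ax 2 = 1 then 1 else -1,
     if PySem.Int.mod (PySem.Int.floordiv ax 2) 2 = 1 then 1 else -1,
     if PySem.Int.mod (PySem.Int.floordiv ax 4) 2 = 1 then 1 else -1]
  -- M[i][perm[i]] = signs[i], 0 elsewhere
  let M : List (List Int) := (List.range 3).map (fun i =>
    (List.range 3).map (fun j => if perm.getD i 0 = j then signs.getD i 0 else 0))
  let pts : List Int := [point.1, point.2.1, point.2.2]
  let offs : List Int := [offset.1, offset.2.1, offset.2.2]
  let out : List Int := (List.range 3).map (fun i =>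
    ((List.range 3).map (fun j => (M.getD i []).getD j 0 * pts.getD j 0)).sum + offs.getD i 0)
  (out.getD 0 0, out.getD 1 0, out.getD 2 0)

-- ===== PRECONDITION & SPEC =====
-- A asserts 0 <= ax < 48 and raises AssertionError otherwise; Pre_ is exactly that.
def Pre_transform (point : Int × Int × Int) (ax : Int) (offset : Int × Int × Int) : Prop :=
  0 ≤ ax ∧ ax < 48
instance (point : Int × Int × Int) (ax : Int) (offset : Int × Int × Int) : Decidable (Pre_transform point ax offset) := by unfold Pre_transform; infer_instance

def pvWitness_transform : (Int × Int × Int) × Int × (Int × Int × Int) := ((1, 2, 3), 13, (4, -5, 6))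

def Spec_transform (point : Int × Int × Int) (ax : Int) (offset : Int × Int × Int) (out : Int × Int × Int) : Prop := out = transform_alt point ax offset
instance (point : Int × Int × Int) (ax : Int) (offset : Int × Int × Int) (out : Int × Int × Int) : Decidable (Spec_transform point ax offset out) := by unfold Spec_transform; infer_instance

-- ===== CLAIM (what is proved, stated in full; the proofs are below) =====
def Claim_equal_transform : Prop := ∀ (point : Int × Int × Int) (ax : Int) (offset : Int × Int × Int), Dom_transform point ax offset → Pre_transform point ax offset → Spec_transform point ax offset (transform point ax offset)

-- ===== LEMMAS AND PROOFS =====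

set_option maxHeartbeats 4000000 in
theorem transform_eq_alt (point : Int × Int × Int) (ax : Int) (offset : Int × Int × Int)
    (h0 : 0 ≤ ax) (h1 : ax < 48) : transform point ax offset = transform_alt point ax offset := by
  obtain ⟨x, y, z⟩ := point
  obtain ⟨ox, oy, oz⟩ := offset
  interval_cases ax <;>
    simp [transform, transform_alt, pvPermLoop, pvPermsA, pvPermsB, pvIdx3,
      PySem.List.enumerate, PySem.Int.floordiv, PySem.Int.mod, PySem.List.pyGet?,
      PySem.List.pyIdx?, List.range_succ]

-- ===== VERDICT (by name: the statement is the Claim_ definition above) =====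
theorem transform_spec : Claim_equal_transform := by
  intro point ax offset _ hpre
  exact transform_eq_alt point ax offset hpre.1 hpre.2
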